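-- pv_equiv track=rewrite | github.com/Maxic/Nonogrammer | nonogram.py | check_row_is_valid
-- ===== SOURCE A (Python) =====
-- def check_row_is_valid(row_definition, row):
--
--     count = 0
--     row_numbers = []
--     for index in row:
--         if index:
--             count += 1
--         elif count != 0:
--             row_numbers.append(count)
--             count = 0
--     if count != 0:
--         row_numbers.append(count)
--
--     if row_numbers.__eq__(row_definition):
--         return True
--     else:
--         return False
-- ===== SOURCE B (Python) =====
-- def check_row_is_valid(row_definition, row):
--     runs = []
--     i, n = 0, len(row)
--     while i < n:
--         if row[i]:
--             j = i
--             while j < n and row[j]: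
--                 j += 1
--             runs.append(j - i)
--             i = j
--         else:
--             i += 1
--     return runs == row_definition
-- ===== Notes on version B (the rewrite author's own statement) =====
-- stated objective: alternative
-- what changed: Replaces A's one-element-at-a-time state machine (count accumulator with flush-on-zero and a trailing flush) by a two-pointer scan that jumps over each maximal nonzero run and records its length directly, then compares with a plain ==.
import Mathlib
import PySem

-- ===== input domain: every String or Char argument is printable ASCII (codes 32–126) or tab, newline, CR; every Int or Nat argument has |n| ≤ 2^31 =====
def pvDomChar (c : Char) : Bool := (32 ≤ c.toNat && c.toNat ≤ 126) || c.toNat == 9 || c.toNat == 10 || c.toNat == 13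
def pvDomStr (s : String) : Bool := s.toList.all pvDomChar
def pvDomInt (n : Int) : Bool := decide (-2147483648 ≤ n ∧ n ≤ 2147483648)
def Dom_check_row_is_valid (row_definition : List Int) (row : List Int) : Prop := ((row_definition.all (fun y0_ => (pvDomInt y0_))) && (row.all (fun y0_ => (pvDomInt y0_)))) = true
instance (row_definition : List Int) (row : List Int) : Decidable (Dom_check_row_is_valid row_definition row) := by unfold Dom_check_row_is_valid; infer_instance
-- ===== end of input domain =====

-- B replaces A's count/flush state machine by a two-pointer scan over maximal nonzero runs; same cost (alternative decomposition).

-- ===== PORT A =====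
-- A's loop state st = (count, row_numbers); one loop iteration:
def pvStep (st : Int × List Int) (index : Int) : Int × List Int :=
  if index ≠ 0 then (st.1 + 1, st.2)
  else if st.1 ≠ 0 then (0, st.2 ++ [st.1])
  else st

-- the trailing 'if count != 0: row_numbers.append(count)' after the loop
def pvFlush (st : Int × List Int) : List Int :=
  if st.1 ≠ 0 then st.2 ++ [st.1] else st.2

def check_row_is_valid (row_definition : List Int) (row : List Int) : Bool :=
  let row_numbers := pvFlush (row.foldl pvStep ((0 : Int), ([] : List Int)))
  if row_numbers = row_definition then true else false

-- ===== PORT B =====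
-- The outer while: skip a zero, or jump over the maximal nonzero run (the inner 'while row[j]' scan
-- is takeWhile/dropWhile) recording its length j - i = 1 + length of the rest of the run.
def altRuns (row : List Int) : List Int :=
  match row with
  | [] => []
  | x :: xs =>
    if x ≠ 0 then
      ((1 : Int) + (xs.takeWhile (· ≠ 0)).length) :: altRuns (xs.dropWhile (· ≠ 0))
    else altRuns xs
termination_by row.length
decreasing_by
· exact Nat.lt_succ_of_le (List.length_dropWhile_le _ _)
· exact Nat.lt_succ_self _

def check_row_is_valid_alt (row_definition : List Int) (row : List Int) : Bool :=
  altRuns row = row_definition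

-- ===== PRECONDITION & SPEC =====
def Spec_check_row_is_valid (row_definition : List Int) (row : List Int) (out : Bool) : Prop := out = check_row_is_valid_alt row_definition row
instance (row_definition : List Int) (row : List Int) (out : Bool) : Decidable (Spec_check_row_is_valid row_definition row out) := by unfold Spec_check_row_is_valid; infer_instance

-- ===== CLAIM (what is proved, stated in full; the proofs are below) =====
def Claim_equal_check_row_is_valid : Prop := ∀ (row_definition : List Int) (row : List Int), Dom_check_row_is_valid row_definition row → Spec_check_row_is_valid row_definition row (check_row_is_valid row_definition row)

-- ===== LEMMAS AND PROOFS =====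

-- what A's remaining fold contributes, given the pending count c
def pvRunsPre (c : Int) (row : List Int) : List Int :=
  if c ≠ 0 then (c + (row.takeWhile (· ≠ 0)).length) :: altRuns (row.dropWhile (· ≠ 0))
  else altRuns row

theorem pvFold_char (row : List Int) : ∀ (c : Int) (acc : List Int), 0 ≤ c →
    pvFlush (row.foldl pvStep (c, acc)) = acc ++ pvRunsPre c row := by
  induction row with
  | nil =>
    intro c acc _
    by_cases hc : c = 0 <;> simp [pvFlush, pvRunsPre, altRuns, hc]
  | cons x xs ih =>
    intro c acc hc
    by_cases hx : x = 0
    · subst hx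
      by_cases hc0 : c = 0
      · subst hc0
        simp only [List.foldl_cons, pvStep, ne_eq, not_true_eq_false, if_false]
        rw [ih 0 acc le_rfl]
        simp [pvRunsPre, altRuns]
      · simp only [List.foldl_cons, pvStep, ne_eq, not_true_eq_false, if_false, if_pos hc0]
        rw [ih 0 (acc ++ [c]) le_rfl]
        simp [pvRunsPre, altRuns, hc0]
    · simp only [List.foldl_cons, pvStep, ne_eq, hx, not_false_eq_true, if_pos]
      rw [ih (c + 1) acc (by omega)]
      have hcp : c + 1 ≠ 0 := by omega
      by_cases hc0 : c = 0
      · subst hc0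
        simp [pvRunsPre, altRuns, List.dropWhile_cons, hx]
      · simp [pvRunsPre, List.dropWhile_cons, hx, hcp, hc0]
        omega

-- ===== VERDICT (by name: the statement is the Claim_ definition above) =====
theorem check_row_is_valid_spec : Claim_equal_check_row_is_valid := by
  intro rd row _
  unfold Spec_check_row_is_valid check_row_is_valid check_row_is_valid_alt
  rw [pvFold_char row 0 [] le_rfl]
  simp only [pvRunsPre, ne_eq, not_true_eq_false, if_false, List.nil_append]
  by_cases he : altRuns row = rd <;> simp [he]
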